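-- pv_equiv track=rewrite | github.com/netsquare/BrowserBruter | modules/threading/slice_dict_for_threads.py | slice_dict_for_threads
-- ===== SOURCE A (Python) =====
-- def slice_dict_for_threads(input_dict, num_threads):
--     result = [] # Algorithm step: 1 This variable will store list of dictionaries
--     for i in range(num_threads): # Algorithm step: 2 Loop to create dictionary slices for each thread
--         thread_dict = {} # Algorithm step: 2.a This variable will store single dictionaries for specific thread and will be appended into result list
--         for key, values in input_dict.items(): # Algorithm step: 2.b Iterate through each key-value pair in the input dictionary
--             total_elements = len(values) # Algorithm step: 2.b.1 Get the total number of elements for the current key, Example: total_elements = 10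
--             elements_per_thread = total_elements // num_threads # Algorithm step: 2.b.2 Divide the total elements by number of threads, Example: num_threads = 3, elements_per_thread = 10 // 3 = 3
--             start_index = i * elements_per_thread # Algorithm step: 2.b.3 Calculate the starting index for the current thread, Example: i = 0, start_index = 0 * 3 = 0
--             end_index = (i + 1) * elements_per_thread if i < num_threads - 1 else total_elements # Algorithm step: 2.b.4 Calculate the end index, Example: i = 0, end_index = (0 + 1) * 3 = 3, for the last thread end_index = total_elements
--             thread_dict[key] = values[start_index:end_index] # Algorithm step: 2.b.5 Slice the values for the current thread, Example: values = [v1, v2, ..., v10], for i = 0, thread_dict[key] = [v1, v2, v3]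
--         result.append(thread_dict) # Algorithm step: 2.c Append the dictionary slice to the result list
--     return result # Algorithm step: 3 Return the list of dictionary slices
-- ===== SOURCE B (Python) =====
-- def slice_dict_for_threads(input_dict, num_threads):
--     # Distribute each element to its thread bucket in one pass over every value
--     # list (index arithmetic picks the bucket), instead of slicing per thread.
--     if num_threads <= 0:
--         return []
--     result = [dict() for _ in range(num_threads)]
--     for key, values in input_dict.items():
--         q = len(values) // num_threads
--         for d in result:
--             d[key] = []
--         for idx, v in enumerate(values):
--             t = num_threads - 1 if q == 0 else min(idx // q, num_threads - 1)
--             result[t][key].append(v)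
--     return result
-- ===== Notes on version B (the rewrite author's own statement) =====
-- stated objective: alternative
-- what changed: A slices each key's list once per thread inside a thread-by-key nested loop; B never slices: it walks each value list once and distributes every element into its thread's bucket by index arithmetic (idx//chunk), building all per-thread dicts simultaneously.
import Mathlib
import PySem

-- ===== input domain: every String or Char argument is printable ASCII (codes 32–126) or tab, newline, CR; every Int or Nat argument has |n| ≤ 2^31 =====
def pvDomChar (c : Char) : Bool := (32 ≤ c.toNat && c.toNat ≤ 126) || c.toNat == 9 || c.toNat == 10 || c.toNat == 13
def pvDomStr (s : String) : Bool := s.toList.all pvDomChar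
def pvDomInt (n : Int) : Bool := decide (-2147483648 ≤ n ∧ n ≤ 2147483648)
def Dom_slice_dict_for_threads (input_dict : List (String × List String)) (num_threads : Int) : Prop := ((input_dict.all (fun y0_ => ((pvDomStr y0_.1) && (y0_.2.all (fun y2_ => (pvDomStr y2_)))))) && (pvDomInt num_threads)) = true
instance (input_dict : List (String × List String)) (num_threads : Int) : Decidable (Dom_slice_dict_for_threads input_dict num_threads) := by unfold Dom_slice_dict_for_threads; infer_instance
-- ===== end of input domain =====

-- B distributes each element of every value list into its thread's bucket by index arithmetic
-- in one pass, instead of A's per-thread re-slicing (alternative algorithm, same cost).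


-- ===== PORT A =====
def slice_dict_for_threads (input_dict : List (String × List String)) (num_threads : Int) : List (List (String × List String)) :=
  (PySem.List.pyRange 0 num_threads 1).foldl (fun result i =>
    result ++ [((input_dict.foldl (fun td kv =>
        let total : Int := kv.2.length
        let elements_per_thread := PySem.Int.floordiv total num_threads
        let start_index := i * elements_per_thread
        let end_index := if i < num_threads - 1 then (i + 1) * elements_per_thread else total
        td.insert kv.1 (PySem.List.slice kv.2 (some start_index) (some end_index)))
      (PySem.Dict.empty : PySem.Dict String (List String))).items)]) []

-- ===== PORT B =====
-- one key's pass of Source B: reset every thread's bucket for this key, then distribute the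
-- elements of `values` into the buckets by index arithmetic (result[t][key].append(v))
def sdftStep (nt : Int) (res : List (PySem.Dict String (List String))) (kv : String × List String) : List (PySem.Dict String (List String)) :=
  let q := PySem.Int.floordiv (kv.2.length : Int) nt
  let res1 := res.map (fun d => d.insert kv.1 ([] : List String))
  (PySem.List.enumerate kv.2 0).foldl (fun r p =>
      let t : Int := if q = 0 then nt - 1 else min (PySem.Int.floordiv p.1 q) (nt - 1)
      -- 0 < nt gives 0 ≤ t < nt, so `t.toNat` is exactly Python's result[t]
      r.modify t.toNat (fun d => d.modify kv.1 [] (fun l => l ++ [p.2]))) res1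

def slice_dict_for_threads_alt (input_dict : List (String × List String)) (num_threads : Int) : List (List (String × List String)) :=
  if num_threads ≤ 0 then []
  else ((input_dict.foldl (sdftStep num_threads)
          (List.replicate num_threads.toNat (PySem.Dict.empty : PySem.Dict String (List String)))).map
        PySem.Dict.items)

-- ===== PRECONDITION & SPEC =====
def Spec_slice_dict_for_threads (input_dict : List (String × List String)) (num_threads : Int) (out : List (List (String × List String))) : Prop := out = slice_dict_for_threads_alt input_dict num_threads
instance (input_dict : List (String × List String)) (num_threads : Int) (out : List (List (String × List String))) : Decidable (Spec_slice_dict_for_threads input_dict num_threads out) := by unfold Spec_slice_dict_for_threads; infer_instance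

-- ===== CLAIM =====
def Claim_equal_slice_dict_for_threads : Prop := ∀ (input_dict : List (String × List String)) (num_threads : Int), Dom_slice_dict_for_threads input_dict num_threads → Spec_slice_dict_for_threads input_dict num_threads (slice_dict_for_threads input_dict num_threads)

-- ===== LEMMAS AND PROOFS =====

-- A's slice for thread i (definitionally A's inner insert value)
def sliceFor (nt i : Int) (values : List String) : List String :=
  PySem.List.slice values (some (i * PySem.Int.floordiv (values.length : Int) nt))
    (some (if i < nt - 1 then (i + 1) * PySem.Int.floordiv (values.length : Int) nt else (values.length : Int)))

-- a fold of index-targeted modifies, read pointwise: position j sees exactly the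
-- modifications aimed at j, in order
theorem foldl_modify_getElem? {α β : Type} (pairs : List β) (tn : β → Nat) (g : β → α → α)
    (r0 : List α) (j : Nat) :
    (pairs.foldl (fun r p => r.modify (tn p) (g p)) r0)[j]? =
      r0[j]?.map (fun d0 => (pairs.filter (fun p => tn p == j)).foldl (fun d p => g p d) d0) := by
  induction pairs generalizing r0 with
  | nil => cases h : r0[j]? <;> simp [h]
  | cons p ps ih =>
      simp only [List.foldl_cons, List.filter_cons]
      rw [ih, List.getElem?_modify]
      by_cases h : tn p = j
      · cases r0[j]? <;> simp [h]
      · cases r0[j]? <;> simp [h]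

-- appending values one by one at a fixed key is a single insert of the whole list
theorem foldl_modify_append_insert (vs : List String) (d : PySem.Dict String (List String))
    (k : String) (w : List String) :
    vs.foldl (fun d v => PySem.Dict.modify d k [] (fun l => l ++ [v])) (d.insert k w)
      = d.insert k (w ++ vs) := by
  induction vs generalizing w with
  | nil => simp
  | cons v vs ih =>
      simp only [List.foldl_cons]
      have h1 : PySem.Dict.modify (d.insert k w) k [] (fun l => l ++ [v]) = d.insert k (w ++ [v]) := by
        show (d.insert k w).insert k (((d.insert k w).getD k []) ++ [v]) = _
        rw [PySem.Dict.getD_insert_self, PySem.Dict.insert_insert_self]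
      rw [h1, ih]
      simp

-- the bucket an element lands in is j iff its index lies in A's slice interval for thread j
theorem bucket_iff (nt q len idx : Int) (j : Nat) (hnt : 0 < nt) (hj : (j : Int) < nt)
    (hq : 0 ≤ q) (h0 : 0 ≤ idx) (hlen : idx < len) :
    ((if q = 0 then nt - 1 else min (PySem.Int.floordiv idx q) (nt - 1)).toNat = j)
      ↔ ((j : Int) * q ≤ idx ∧ idx < (if (j : Int) < nt - 1 then ((j : Int) + 1) * q else len)) := by
  by_cases hq0 : q = 0
  · subst hq0
    rw [if_pos rfl]
    by_cases hjl : (j : Int) < nt - 1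
    · rw [if_pos hjl]; simp only [mul_zero]; omega
    · rw [if_neg hjl]; simp only [mul_zero]; omega
  · have hqpos : 0 < q := lt_of_le_of_ne hq (Ne.symm hq0)
    rw [if_neg hq0]
    have hfd0 : 0 ≤ PySem.Int.floordiv idx q := by
      rw [PySem.Int.floordiv_eq_ediv_of_pos hqpos]
      exact Int.ediv_nonneg h0 (le_of_lt hqpos)
    have hbr := PySem.Int.floordiv_eq_iff_of_pos (a := idx) (b := q) (q := (j : Int)) hqpos
    have hle := PySem.Int.le_floordiv_iff_mul_le (a := idx) (b := q) (q := nt - 1) hqpos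
    by_cases hjl : (j : Int) < nt - 1
    · rw [if_pos hjl, ← hbr]
      omega
    · rw [if_neg hjl]
      have hj1 : (j : Int) = nt - 1 := by omega
      constructor
      · intro h
        have hfle : nt - 1 ≤ PySem.Int.floordiv idx q := by omega
        exact ⟨by rw [hj1]; exact hle.mp hfle, hlen⟩
      · rintro ⟨h1, _⟩
        have hfle : nt - 1 ≤ PySem.Int.floordiv idx q := hle.mpr (by rw [← hj1]; exact h1)
        omega

-- filtering an enumeration by an index interval is a contiguous drop/take
theorem filter_enumerate_interval (xs : List String) (s lo hi : Int) :
    ((PySem.List.enumerate xs s).filter (fun p => decide (lo ≤ p.1 ∧ p.1 < hi))).map (fun p => p.2)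
      = (xs.drop (lo - s).toNat).take ((hi - s).toNat - (lo - s).toNat) := by
  induction xs generalizing s with
  | nil => simp [PySem.List.enumerate_nil]
  | cons x xs ih =>
      rw [PySem.List.enumerate_cons]
      simp only [List.filter_cons]
      by_cases hc : lo ≤ s ∧ s < hi
      · rw [if_pos (by simpa using hc)]
        simp only [List.map_cons]
        rw [ih]
        have h1 : (lo - s).toNat = 0 := by omega
        have h2 : (lo - (s + 1)).toNat = 0 := by omega
        have h3 : (hi - s).toNat = (hi - (s + 1)).toNat + 1 := by omega
        rw [h1, h2, h3]
        simp
      · rw [if_neg (by simpa using hc)]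
        rw [ih]
        by_cases hs : s < lo
        · have ha : (lo - s).toNat = (lo - (s + 1)).toNat + 1 := by omega
          rw [ha, List.drop_succ_cons]
          congr 1
          omega
        · have h1 : (hi - (s + 1)).toNat - (lo - (s + 1)).toNat = 0 := by omega
          have h2 : (hi - s).toNat - (lo - s).toNat = 0 := by omega
          rw [h1, h2]
          simp
-- one sdftStep, read pointwise: thread j's dict gains key ↦ A's slice for thread j
theorem sdftStep_getElem? (nt : Int) (hnt : 0 < nt) (res : List (PySem.Dict String (List String)))
    (kv : String × List String) (j : Nat) (hj : (j : Int) < nt) :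
    (sdftStep nt res kv)[j]? = res[j]?.map (fun d => d.insert kv.1 (sliceFor nt (j : Int) kv.2)) := by
  have hq : 0 ≤ PySem.Int.floordiv (kv.2.length : Int) nt := by
    rw [PySem.Int.floordiv_eq_ediv_of_pos hnt]
    exact Int.ediv_nonneg (Int.natCast_nonneg _) (le_of_lt hnt)
  have h1 : (sdftStep nt res kv)[j]? =
      (res.map (fun d => d.insert kv.1 ([] : List String)))[j]?.map
        (fun d0 => ((PySem.List.enumerate kv.2 0).filter
            (fun p => (if PySem.Int.floordiv (kv.2.length : Int) nt = 0 then nt - 1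
              else min (PySem.Int.floordiv p.1 (PySem.Int.floordiv (kv.2.length : Int) nt)) (nt - 1)).toNat == j)).foldl
          (fun d p => d.modify kv.1 [] (fun l => l ++ [p.2])) d0) := by
    have h0 := foldl_modify_getElem? (PySem.List.enumerate kv.2 0)
      (fun p : Int × String => (if PySem.Int.floordiv (kv.2.length : Int) nt = 0 then nt - 1
        else min (PySem.Int.floordiv p.1 (PySem.Int.floordiv (kv.2.length : Int) nt)) (nt - 1)).toNat)
      (fun (p : Int × String) (d : PySem.Dict String (List String)) =>
        d.modify kv.1 [] (fun l => l ++ [p.2]))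
      (res.map (fun d => d.insert kv.1 ([] : List String))) j
    exact h0
  rw [h1, List.getElem?_map]
  cases hres : res[j]? with
  | none => simp
  | some d0 =>
      simp only [Option.map_some]
      congr 1
      have hcond : ∀ p ∈ PySem.List.enumerate kv.2 0,
          ((if PySem.Int.floordiv (kv.2.length : Int) nt = 0 then nt - 1
            else min (PySem.Int.floordiv p.1 (PySem.Int.floordiv (kv.2.length : Int) nt)) (nt - 1)).toNat == j)
          = decide ((j : Int) * PySem.Int.floordiv (kv.2.length : Int) nt ≤ p.1 ∧
              p.1 < (if (j : Int) < nt - 1 then ((j : Int) + 1) * PySem.Int.floordiv (kv.2.length : Int) nt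
                     else (kv.2.length : Int))) := by
        intro p hp
        obtain ⟨k, hk, rfl⟩ := (PySem.List.mem_enumerate_iff kv.2 0 p).1 hp
        rw [Bool.eq_iff_iff]
        simp only [beq_iff_eq, decide_eq_true_eq]
        exact bucket_iff nt _ (kv.2.length : Int) _ j hnt hj hq (by omega) (by omega)
      rw [List.filter_congr hcond,
        ← List.foldl_map (f := fun p : Int × String => p.2)
          (g := fun d v => PySem.Dict.modify d kv.1 [] (fun l => l ++ [v])),
        filter_enumerate_interval, foldl_modify_append_insert]
      congr 1
      rw [List.nil_append]
      unfold sliceFor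
      rw [PySem.List.slice_toNat kv.2 (mul_nonneg (Int.natCast_nonneg j) hq)
        (by split
            · exact mul_nonneg (by omega) hq
            · exact Int.natCast_nonneg _)]
      rw [sub_zero, sub_zero]

-- index-targeted modify folds preserve length
theorem foldl_modify_length {α β : Type} (pairs : List β) (tn : β → Nat) (g : β → α → α)
    (r0 : List α) :
    (pairs.foldl (fun r p => r.modify (tn p) (g p)) r0).length = r0.length := by
  induction pairs generalizing r0 with
  | nil => rfl
  | cons p ps ih => simp only [List.foldl_cons]; rw [ih, List.length_modify]

theorem foldl_sdftStep_length (nt : Int) (l : List (String × List String))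
    (res : List (PySem.Dict String (List String))) :
    (l.foldl (sdftStep nt) res).length = res.length := by
  induction l generalizing res with
  | nil => rfl
  | cons kv l ih =>
      simp only [List.foldl_cons]
      rw [ih]
      have h := foldl_modify_length (PySem.List.enumerate kv.2 0)
        (fun p : Int × String => (if PySem.Int.floordiv (kv.2.length : Int) nt = 0 then nt - 1
          else min (PySem.Int.floordiv p.1 (PySem.Int.floordiv (kv.2.length : Int) nt)) (nt - 1)).toNat)
        (fun (p : Int × String) (d : PySem.Dict String (List String)) =>
          d.modify kv.1 [] (fun l => l ++ [p.2]))
        (res.map (fun d => d.insert kv.1 ([] : List String)))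
      rw [List.length_map] at h
      exact h

-- the whole outer fold, read pointwise: thread j's dict is exactly A's inner fold for i = j
theorem foldl_sdftStep_getElem? (nt : Int) (hnt : 0 < nt) (l : List (String × List String))
    (res : List (PySem.Dict String (List String))) (j : Nat) (hj : (j : Int) < nt) :
    (l.foldl (sdftStep nt) res)[j]? =
      res[j]?.map (fun d0 => l.foldl (fun td kv => td.insert kv.1 (sliceFor nt (j : Int) kv.2)) d0) := by
  induction l generalizing res with
  | nil => cases h : res[j]? <;> simp [h]
  | cons kv l ih =>
      simp only [List.foldl_cons]
      rw [ih, sdftStep_getElem? nt hnt res kv j hj]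
      cases res[j]? <;> simp

-- ===== VERDICT =====
theorem slice_dict_for_threads_spec : Claim_equal_slice_dict_for_threads := by
  intro input_dict num_threads _
  show slice_dict_for_threads input_dict num_threads = slice_dict_for_threads_alt input_dict num_threads
  unfold slice_dict_for_threads slice_dict_for_threads_alt
  by_cases hnt : num_threads ≤ 0
  · rw [if_pos hnt, PySem.List.pyRange_one_eq_nil hnt]
    rfl
  · rw [if_neg hnt]
    have hpos : 0 < num_threads := by omega
    rw [PySem.List.foldl_append_singleton_eq_map, List.nil_append]
    apply List.ext_getElem?
    intro j
    rw [List.getElem?_map, List.getElem?_map]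
    by_cases hjlt : j < num_threads.toNat
    · have hj : (j : Int) < num_threads := by omega
      rw [foldl_sdftStep_getElem? num_threads hpos input_dict _ j hj]
      rw [List.getElem?_replicate, if_pos hjlt]
      rw [PySem.List.getElem?_pyRange_one]
      have h2 : j < (num_threads - 0).toNat := by omega
      rw [if_pos h2]
      simp only [Option.map_some, zero_add]
      rfl
    · rw [PySem.List.getElem?_pyRange_one]
      have h2 : ¬ j < (num_threads - 0).toNat := by omega
      rw [if_neg h2]
      rw [List.getElem?_eq_none
        (by rw [foldl_sdftStep_length, List.length_replicate]; omega)]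
      rfl
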